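-- pv_equiv track=rewrite | github.com/mariabv/MariaVillafranca_labb321 | oversattning.py | rovarsprak
-- ===== SOURCE A (Python) =====
-- def rovarsprak(inrad):
-- 	vokaler = 'aouaeiyaoAOUaEIYao'
-- 	konsonanter = 'bcdfghjklmnpqrstvwxzBCDFGHJKLMNPQRSTVWXZ'
-- 	utr = ""
-- 	for s in inrad:
-- 		if s in konsonanter:
-- 			utr += s
-- 			utr += 'o'
-- 			utr += s
-- 		else:
-- 			utr += s
-- 	return utr
-- ===== SOURCE B (Python) =====
-- def rovarsprak(inrad):
--     # Divide and conquer: the transform is a homomorphism on concatenation,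
--     # so split at the midpoint, translate halves, and join.
--     n = len(inrad)
--     if n == 0:
--         return ""
--     if n == 1:
--         c = inrad
--         if c.isascii() and c.isalpha() and c.lower() not in 'aeiouy':
--             return c + 'o' + c
--         return c
--     m = n // 2
--     return rovarsprak(inrad[:m]) + rovarsprak(inrad[m:])
-- ===== Notes on version B (the rewrite author's own statement) =====
-- stated objective: alternative
-- what changed: Replaces the left-to-right accumulating loop with its 40-character membership scan per character by a divide-and-conquer recursion (split at the midpoint, translate both halves, concatenate) whose single-character base case classifies consonants arithmetically (ASCII letter whose lowercase is not in 'aeiouy'); correct because the transform is a homomorphism on string concatenation.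
import Mathlib
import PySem

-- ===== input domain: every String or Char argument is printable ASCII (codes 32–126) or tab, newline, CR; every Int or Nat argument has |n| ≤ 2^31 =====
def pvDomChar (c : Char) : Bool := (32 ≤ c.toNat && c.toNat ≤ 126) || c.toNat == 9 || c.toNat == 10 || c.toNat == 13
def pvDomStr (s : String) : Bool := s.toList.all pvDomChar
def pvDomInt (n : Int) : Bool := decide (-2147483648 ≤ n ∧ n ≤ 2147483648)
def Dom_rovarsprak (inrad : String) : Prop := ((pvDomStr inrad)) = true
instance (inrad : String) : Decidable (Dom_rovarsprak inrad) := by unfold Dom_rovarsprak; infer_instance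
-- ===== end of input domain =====

set_option maxRecDepth 10000


-- B replaces A's left-to-right accumulating loop with 40-char membership scans by a divide-and-conquer
-- recursion (split at the midpoint, translate halves, concatenate) whose base case classifies a single
-- character arithmetically (ASCII letter that is not a vowel/'y'); an alternative decomposition, not faster.

-- ===== PORT A =====
-- A's consonant string constant
def konsonanterA : List Char :=
  ['b','c','d','f','g','h','j','k','l','m','n','p','q','r','s','t','v','w','x','z',
   'B','C','D','F','G','H','J','K','L','M','N','P','Q','R','S','T','V','W','X','Z']

-- loop 'for s in inrad' accumulating utr; 's in konsonanter' is char membership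
def rovarsprak (inrad : String) : String :=
  String.mk (inrad.toList.foldl
    (fun utr s => if konsonanterA.contains s then utr ++ [s, 'o', s] else utr ++ [s]) [])

-- ===== PORT B =====
-- base case test: c.isascii() and c.isalpha() and c.lower() not in 'aeiouy'
-- (c.isascii() is ported by hand as c.toNat ≤ 127 — exact: isascii = code point < 128)
def isConsB (c : Char) : Bool :=
  decide (c.toNat ≤ 127) && PySem.Chars.isalpha c &&
    !(PySem.Chars.isIn (PySem.Chars.lower [c]) ['a','e','i','o','u','y'])

-- divide and conquer: n ≤ 1 is the base case, else split at m = n // 2 and recurse on both halves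
def rovarsprak_alt_core (l : List Char) : List Char :=
  match l with
  | [] => []
  | [c] => if isConsB c then [c, 'o', c] else [c]
  | a :: b :: rest =>
    let l' := a :: b :: rest
    let m := l'.length / 2
    rovarsprak_alt_core (l'.take m) ++ rovarsprak_alt_core (l'.drop m)
termination_by l.length
decreasing_by
  · simp; omega
  · simp; omega

def rovarsprak_alt (inrad : String) : String :=
  String.mk (rovarsprak_alt_core inrad.toList)

-- ===== PRECONDITION & SPEC =====
def Spec_rovarsprak (inrad : String) (out : String) : Prop := out = rovarsprak_alt inrad
instance (inrad : String) (out : String) : Decidable (Spec_rovarsprak inrad out) := by unfold Spec_rovarsprak; infer_instance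

-- ===== CLAIM =====
def Claim_equal_rovarsprak : Prop := ∀ (inrad : String), Dom_rovarsprak inrad → Spec_rovarsprak inrad (rovarsprak inrad)

-- ===== LEMMAS AND PROOFS =====

-- the per-character expansion both programs compute
def expandB (c : Char) : List Char := if isConsB c then [c, 'o', c] else [c]

theorem mem_konsonanter_alpha : ∀ c ∈ konsonanterA, PySem.Chars.isalpha c = true := by
  intro c hc; fin_cases hc <;> rfl

-- B's arithmetic consonant test agrees with A's membership test on every character
theorem cons_char (c : Char) : konsonanterA.contains c = isConsB c := by
  by_cases ha : PySem.Chars.isalpha c = true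
  · have h1 : Char.ofNat c.toNat = c := Char.ofNat_toNat c
    have hb : (65 ≤ c.toNat ∧ c.toNat ≤ 90) ∨ (97 ≤ c.toNat ∧ c.toNat ≤ 122) := by
      simp only [PySem.Chars.isalpha, PySem.Chars.isupper, PySem.Chars.islower,
        Bool.or_eq_true, Bool.and_eq_true, decide_eq_true_eq, Char.le_def,
        UInt32.le_iff_toNat_le] at ha
      rcases ha with ⟨h2, h3⟩ | ⟨h2, h3⟩
      · left; exact ⟨h2, h3⟩
      · right; exact ⟨h2, h3⟩
    rcases hb with ⟨h2, h3⟩ | ⟨h2, h3⟩ <;>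
    · interval_cases h : c.toNat <;>
      · rw [← h1]; decide
  · have hc : konsonanterA.contains c = false := by
      by_contra h
      have hm : c ∈ konsonanterA := by
        simpa using h
      exact ha (mem_konsonanter_alpha c hm)
    have ha' : PySem.Chars.isalpha c = false := by
      exact Bool.not_eq_true _ ▸ (by simpa using ha)
    rw [hc]
    unfold isConsB
    rw [ha']
    simp

-- the divide-and-conquer recursion computes the per-character expansion of the whole list
theorem core_eq_aux : ∀ (n : Nat) (l : List Char), l.length ≤ n →
    rovarsprak_alt_core l = l.flatMap expandB := by
  intro n
  induction n with
  | zero =>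
    intro l h
    cases l with
    | nil => simp [rovarsprak_alt_core]
    | cons a t => simp at h
  | succ n ih =>
    intro l h
    match l with
    | [] => simp [rovarsprak_alt_core]
    | [c] => simp [rovarsprak_alt_core, expandB]
    | a :: b :: rest =>
      rw [rovarsprak_alt_core]
      have hlen : (a :: b :: rest).length = rest.length + 2 := by simp
      have h1 : ((a :: b :: rest).take ((a :: b :: rest).length / 2)).length ≤ n := by
        simp at h ⊢; omega
      have h2 : ((a :: b :: rest).drop ((a :: b :: rest).length / 2)).length ≤ n := by
        simp at h ⊢; omega
      rw [ih _ h1, ih _ h2, ← List.flatMap_append, List.take_append_drop]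

theorem core_eq (l : List Char) : rovarsprak_alt_core l = l.flatMap expandB :=
  core_eq_aux l.length l le_rfl

-- ===== VERDICT =====
theorem rovarsprak_spec : Claim_equal_rovarsprak := by
  intro inrad _
  unfold Spec_rovarsprak rovarsprak rovarsprak_alt
  rw [core_eq]
  congr 1
  have hstep : (fun (utr : List Char) (s : Char) =>
      if konsonanterA.contains s then utr ++ [s, 'o', s] else utr ++ [s])
      = fun utr s => utr ++ expandB s := by
    funext utr s
    unfold expandB
    rw [cons_char]
    split_ifs <;> rfl
  rw [hstep, PySem.List.foldl_append_eq_flatMap]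
  simp
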